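-- pv_equiv track=rewrite | github.com/mar22266/Cifrados-26-AMT | Ejercicios/Ejercicio de Criptografía/Parte 2/XoraBin.py | AgruparEnOctetos
-- ===== SOURCE A (Python) =====
-- def AgruparEnOctetos(CadenaBinariaLimpia):
--     ResultadoAgrupado = ""
--     ContadorBits = 0
--
--     # Se recorre cada bit
--     for Bit in CadenaBinariaLimpia:
--         # verificacion si agregar espacio
--         if ContadorBits > 0 and (ContadorBits % 8) == 0:
--             ResultadoAgrupado = ResultadoAgrupado + " "
--
--         # se agrega bit actual
--         ResultadoAgrupado = ResultadoAgrupado + Bit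
--
--         # Incrementa conta
--         ContadorBits = ContadorBits + 1
--
--     return ResultadoAgrupado
-- ===== SOURCE B (Python) =====
-- def AgruparEnOctetos(CadenaBinariaLimpia):
--     return " ".join(
--         CadenaBinariaLimpia[i:i + 8]
--         for i in range(0, len(CadenaBinariaLimpia), 8)
--     )
-- ===== Notes on version B (the rewrite author's own statement) =====
-- stated objective: faster
-- what changed: Replaces the per-character loop with its bit counter and modulo space-insertion test by slicing the string into 8-wide chunks via a stepped range and joining them with a single space.
import Mathlib
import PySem

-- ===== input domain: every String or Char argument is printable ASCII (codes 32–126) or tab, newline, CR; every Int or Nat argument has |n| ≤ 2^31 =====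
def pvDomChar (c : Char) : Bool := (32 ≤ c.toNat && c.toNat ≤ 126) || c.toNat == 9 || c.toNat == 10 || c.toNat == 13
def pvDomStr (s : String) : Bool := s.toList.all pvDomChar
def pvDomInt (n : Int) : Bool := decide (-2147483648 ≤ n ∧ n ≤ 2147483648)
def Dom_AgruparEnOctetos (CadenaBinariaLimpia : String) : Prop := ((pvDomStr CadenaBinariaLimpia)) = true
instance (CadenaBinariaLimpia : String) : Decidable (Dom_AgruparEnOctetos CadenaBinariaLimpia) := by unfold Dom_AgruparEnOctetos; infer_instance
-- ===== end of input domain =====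

-- B replaces A's per-character loop (counter + modulo space test) by 8-wide slices
-- produced with a stepped range and joined with a single space (objective: faster, constant factor).

-- ===== PORT A =====
-- the loop body: maybe append ' ', append the bit, bump the counter
def stepA (st : List Char × Nat) (Bit : Char) : List Char × Nat :=
  ((if 0 < st.2 ∧ st.2 % 8 = 0 then st.1 ++ [' '] else st.1) ++ [Bit], st.2 + 1)

def AgruparEnOctetos (CadenaBinariaLimpia : String) : String :=
  String.mk ((CadenaBinariaLimpia.toList.foldl stepA ([], 0)).1)

-- ===== PORT B =====
-- " ".join(s[i:i+8] for i in range(0, len(s), 8))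
def AgruparEnOctetos_alt (CadenaBinariaLimpia : String) : String :=
  String.mk (PySem.Chars.join [' ']
    ((PySem.List.pyRange 0 (CadenaBinariaLimpia.toList.length : Int) 8).map
      (fun i => PySem.List.slice CadenaBinariaLimpia.toList (some i) (some (i + 8)))))

-- ===== PRECONDITION & SPEC =====
def Spec_AgruparEnOctetos (CadenaBinariaLimpia : String) (out : String) : Prop := out = AgruparEnOctetos_alt CadenaBinariaLimpia
instance (CadenaBinariaLimpia : String) (out : String) : Decidable (Spec_AgruparEnOctetos CadenaBinariaLimpia out) := by unfold Spec_AgruparEnOctetos; infer_instance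

-- ===== CLAIM (what is proved, stated in full; the proofs are below) =====
def Claim_equal_AgruparEnOctetos : Prop := ∀ (CadenaBinariaLimpia : String), Dom_AgruparEnOctetos CadenaBinariaLimpia → Spec_AgruparEnOctetos CadenaBinariaLimpia (AgruparEnOctetos CadenaBinariaLimpia)

-- ===== LEMMAS AND PROOFS =====

-- the characters A's loop emits when the counter starts at n
def fIns : Nat → List Char → List Char
  | _, [] => []
  | n, c :: cs => (if 0 < n ∧ n % 8 = 0 then [' '] else []) ++ c :: fIns (n + 1) cs

lemma foldA_eq : ∀ (cs : List Char) (acc : List Char) (n : Nat),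
    List.foldl stepA (acc, n) cs = (acc ++ fIns n cs, n + cs.length) := by
  intro cs
  induction cs with
  | nil => intro acc n; simp [fIns]
  | cons c cs ih =>
      intro acc n
      simp only [List.foldl_cons, stepA, fIns, ih]
      split_ifs with h <;> simp <;> omega

lemma fIns_append : ∀ (xs ys : List Char) (n : Nat),
    fIns n (xs ++ ys) = fIns n xs ++ fIns (n + xs.length) ys := by
  intro xs
  induction xs with
  | nil => intro ys n; simp [fIns]
  | cons c cs ih =>
      intro ys n
      simp only [List.cons_append, fIns, ih, List.length_cons]
      have : n + 1 + cs.length = n + (cs.length + 1) := by omega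
      rw [this]
      simp

lemma fIns_small : ∀ (cs : List Char) (n : Nat), cs.length + n ≤ 8 → fIns n cs = cs := by
  intro cs
  induction cs with
  | nil => intro n _; simp [fIns]
  | cons c cs ih =>
      intro n h
      have hc : ¬ (0 < n ∧ n % 8 = 0) := by
        simp at h; omega
      simp only [fIns, if_neg hc, List.nil_append]
      rw [ih (n + 1) (by simp at h ⊢; omega)]

lemma fIns_shift : ∀ (cs : List Char) (n m : Nat), 0 < n → 0 < m → n % 8 = m % 8 →
    fIns n cs = fIns m cs := by
  intro cs
  induction cs with
  | nil => intros; simp [fIns]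
  | cons c cs ih =>
      intro n m hn hm hmod
      have : (0 < n ∧ n % 8 = 0) ↔ (0 < m ∧ m % 8 = 0) := by omega
      simp only [fIns, this, ih (n + 1) (m + 1) (by omega) (by omega) (by omega)]

-- the chunk list B's comprehension denotes
def chunkRec : List Char → List (List Char)
  | [] => []
  | c :: cs => (c :: cs).take 8 :: chunkRec ((c :: cs).drop 8)
  termination_by cs => cs.length
  decreasing_by simp

lemma chunkRec_ne_nil (cs : List Char) (h : cs ≠ []) :
    chunkRec cs = cs.take 8 :: chunkRec (cs.drop 8) := by
  cases cs with
  | nil => exact absurd rfl h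
  | cons c cs => rw [chunkRec]

lemma slice8 (cs : List Char) (k : Nat) :
    PySem.List.slice cs (some (0 + 8 * (k : Int))) (some (0 + 8 * (k : Int) + 8)) =
      (cs.drop (8 * k)).take 8 := by
  have h1 : (0 + 8 * (k : Int)) = ((8 * k : Nat) : Int) := by push_cast; ring
  rw [h1]
  exact_mod_cast PySem.List.slice_natCast_add cs (8 * k) 8

lemma rangeChunks : ∀ (fuel : Nat) (cs : List Char), cs.length ≤ fuel →
    (List.range ((cs.length + 7) / 8)).map (fun k => (cs.drop (8 * k)).take 8) = chunkRec cs := by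
  intro fuel
  induction fuel with
  | zero =>
      intro cs h
      have : cs = [] := List.eq_nil_of_length_eq_zero (by omega)
      subst this; simp [chunkRec]
  | succ fuel ih =>
      intro cs h
      cases hcs : cs with
      | nil => simp [chunkRec]
      | cons c cs' =>
          rw [← hcs]
          have hne : cs ≠ [] := by rw [hcs]; simp
          have hL : 0 < cs.length := by rw [hcs]; simp
          have hN : (cs.length + 7) / 8 = ((cs.drop 8).length + 7) / 8 + 1 := by
            simp; omega
          rw [hN, List.range_succ_eq_map, List.map_cons, List.map_map,
              chunkRec_ne_nil cs hne]
          have htail : List.map ((fun k => List.take 8 (List.drop (8 * k) cs)) ∘ Nat.succ)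
              (List.range (((List.drop 8 cs).length + 7) / 8)) = chunkRec (List.drop 8 cs) := by
            rw [← ih (cs.drop 8) (by simp; omega)]
            apply List.map_congr_left
            intro k _
            simp [Function.comp, List.drop_drop]
            congr 2
            omega
          rw [htail]
          simp

lemma chunks_eq (cs : List Char) :
    (PySem.List.pyRange 0 (cs.length : Int) 8).map
      (fun i => PySem.List.slice cs (some i) (some (i + 8))) = chunkRec cs := by
  rw [PySem.List.pyRange_of_pos 0 (cs.length : Int) (by norm_num), List.map_map]
  have hN : (if (0 : Int) < (cs.length : Int) then (((cs.length : Int) - 0 + 8 - 1) / 8).toNat else 0)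
      = (cs.length + 7) / 8 := by
    split_ifs <;> omega
  rw [hN, ← rangeChunks cs.length cs (le_refl _)]
  apply List.map_congr_left
  intro k _
  exact slice8 cs k

lemma join_chunkRec : ∀ (fuel : Nat) (cs : List Char), cs.length ≤ fuel →
    PySem.Chars.join [' '] (chunkRec cs) = fIns 0 cs := by
  intro fuel
  induction fuel with
  | zero =>
      intro cs h
      have : cs = [] := List.eq_nil_of_length_eq_zero (by omega)
      subst this; simp [chunkRec, fIns, PySem.Chars.join_nil]
  | succ fuel ih =>
      intro cs h
      cases hcs : cs with
      | nil => simp [chunkRec, fIns, PySem.Chars.join_nil]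
      | cons c cs' =>
          rw [← hcs]
          have hne : cs ≠ [] := by rw [hcs]; simp
          rw [chunkRec_ne_nil cs hne]
          by_cases h8 : cs.length ≤ 8
          · have hdrop : cs.drop 8 = [] := List.drop_eq_nil_of_le h8
            rw [hdrop, List.take_of_length_le h8]
            simp [chunkRec, PySem.Chars.join_singleton]
            exact (fIns_small cs 0 (by omega)).symm
          · -- cs longer than 8: peel one octet and a space
            have hdl : 0 < (cs.drop 8).length := by simp; omega
            obtain ⟨d, ds, hd⟩ : ∃ d ds, cs.drop 8 = d :: ds := by
              cases hh : cs.drop 8 with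
              | nil => rw [hh] at hdl; simp at hdl
              | cons d ds => exact ⟨d, ds, rfl⟩
            rw [hd, chunkRec_ne_nil (d :: ds) (by simp), PySem.Chars.join_cons_cons,
                ← chunkRec_ne_nil (d :: ds) (by simp),
                ih (d :: ds) (by
                  have hl2 : (d :: ds).length = cs.length - 8 := by rw [← hd]; simp
                  omega)]
            conv_rhs => rw [← List.take_append_drop 8 cs]
            rw [fIns_append]
            have hlen : (cs.take 8).length = 8 := by simp; omega
            rw [hlen, fIns_small (cs.take 8) 0 (by omega), hd]
            have h9 : fIns (0 + 8) (d :: ds) = ' ' :: d :: fIns 1 ds := by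
              have hs := fIns_shift ds (0 + 8 + 1) 1 (by omega) (by omega) (by omega)
              simp [fIns, hs]
            have h0 : fIns 0 (d :: ds) = d :: fIns 1 ds := by
              simp [fIns]
            rw [h9, h0]
            simp

-- ===== VERDICT (by name: the statement is the Claim_ definition above) =====
theorem AgruparEnOctetos_spec : Claim_equal_AgruparEnOctetos := by
  intro s _
  unfold Spec_AgruparEnOctetos AgruparEnOctetos AgruparEnOctetos_alt
  rw [foldA_eq, chunks_eq s.toList, join_chunkRec s.toList.length s.toList (le_refl _)]
  simp
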